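-- pv_equiv track=rewrite | github.com/steveandroulakis/MyTARDIS | tardis/apps/mrtardis/utils.py | getGroupNumbersFromNumber
-- ===== SOURCE A (Python) =====
-- def getGroupNumbersFromNumber(number):
--     """
--     get Space Groups in Group from Space Group number
--     :param number: space group number
--     :type number: integer
--     :returns: array of numbers
--     """
--     r = lambda x, y: range(x, y + 1)  # useful shortcut for ranges
--     grouping = [[1],  # triclinic
--                 [3, 4],  # monoclinic p
--                 [5],  # monoclinic c
--                 r(16, 19),  # orthorhombic p
--                 [20, 21],  # orthorhombic c
--                 [22],  # orthorhombic f
--                 [23, 24],  # orthorhombic i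
--                 r(75, 78),  # tetragonal p4
--                 [79, 80],  # tetragonal i4
--                 r(89, 96),  # tetragonal p422
--                 [97, 98],  # tetragonal i422
--                 r(143, 145),  # trigonal p3
--                 [146, 155],  # trigonal r
--                 [149, 151, 153],  # trigonal p312
--                 [150, 152, 154],  # trigonal p321
--                 r(168, 173),  # hexagonal p6
--                 r(177, 182),  # hexagonal p622
--                 [195, 198],  # cubic p2
--                 [196],  # cubic f2
--                 [197, 199],  # cubic i2
--                 [207, 208, 212, 213],  # cubic p4
--                 [209, 210],  # cubic f4
--                 [211, 214],  # cubic i4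
--                 ]
--     mydict = dict()
--     for item in grouping:
--         for jtem in item:
--             mydict[jtem] = item
--     if number in mydict:
--         return mydict[number]
--     else:
--         return []
-- ===== SOURCE B (Python) =====
-- # space groups that belong together; ranges are half-open Python ranges
-- GROUPS = ([1], [3, 4], [5], range(16, 20), [20, 21], [22], [23, 24],
--           range(75, 79), [79, 80], range(89, 97), [97, 98], range(143, 146),
--           [146, 155], [149, 151, 153], [150, 152, 154], range(168, 174),
--           range(177, 183), [195, 198], [196], [197, 199],
--           [207, 208, 212, 213], [209, 210], [211, 214])
--
-- # flat key-sorted table of (space-group number, its group), built once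
-- _PAIRS = sorted(((k, g) for g in GROUPS for k in g), key=lambda p: p[0])
--
--
-- def getGroupNumbersFromNumber(number):
--     """
--     get Space Groups in Group from Space Group number
--     :param number: space group number
--     :type number: integer
--     :returns: array of numbers
--     """
--     # binary search over the sorted pair table
--     lo, hi = 0, len(_PAIRS)
--     while lo < hi:
--         mid = (lo + hi) // 2
--         if _PAIRS[mid][0] < number:
--             lo = mid + 1
--         else:
--             hi = mid
--     if lo < len(_PAIRS) and _PAIRS[lo][0] == number:
--         return _PAIRS[lo][1]
--     return []
-- ===== Notes on version B (the rewrite author's own statement) =====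
-- stated objective: alternative
-- what changed: Replaces A's hash-index construction (dict from every number to its group, then one O(1) lookup) with flattening the table into a key-sorted array of (number, group) pairs and a hand-written binary search over it.
import Mathlib
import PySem

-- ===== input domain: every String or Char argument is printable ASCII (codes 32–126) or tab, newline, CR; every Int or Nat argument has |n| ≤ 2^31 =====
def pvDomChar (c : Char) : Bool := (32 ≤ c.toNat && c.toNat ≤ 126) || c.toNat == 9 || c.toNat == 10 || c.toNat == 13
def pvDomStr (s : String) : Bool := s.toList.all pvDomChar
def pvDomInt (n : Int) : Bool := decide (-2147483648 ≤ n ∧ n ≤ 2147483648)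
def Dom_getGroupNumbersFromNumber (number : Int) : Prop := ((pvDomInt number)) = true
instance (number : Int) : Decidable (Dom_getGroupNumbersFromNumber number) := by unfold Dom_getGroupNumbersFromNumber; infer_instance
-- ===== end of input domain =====

-- B replaces A's "build a dict index, then one hash lookup" with a key-sorted
-- flat array of (number, group) pairs searched by a hand-written binary search.

-- ===== PORT A =====
-- the local `grouping` table of A (r x y = range(x, y+1))
def pvGroupingA : List (List Int) :=
  let r : Int → Int → List Int := fun x y => PySem.List.pyRange x (y + 1) 1
  [[1],
   [3, 4],
   [5],
   r 16 19,
   [20, 21],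
   [22],
   [23, 24],
   r 75 78,
   [79, 80],
   r 89 96,
   [97, 98],
   r 143 145,
   [146, 155],
   [149, 151, 153],
   [150, 152, 154],
   r 168 173,
   r 177 182,
   [195, 198],
   [196],
   [197, 199],
   [207, 208, 212, 213],
   [209, 210],
   [211, 214]]

-- mydict, built by A's nested loop over grouping (independent of number)
def pvMyDict : PySem.Dict Int (List Int) :=
  pvGroupingA.foldl (fun d item => item.foldl (fun d jtem => d.insert jtem item) d)
    PySem.Dict.empty

def getGroupNumbersFromNumber (number : Int) : List Int :=
  if pvMyDict.contains number then (pvMyDict.get? number).getD [] else []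
  -- `mydict[number]` is only reached under the `in` guard, so get? is some; getD [] is exact

-- ===== PORT B =====
-- GROUPS of Source B: range(a, b) = PySem.List.pyRange a b 1
def pvGroups : List (List Int) :=
  [[1], [3, 4], [5], PySem.List.pyRange 16 20 1, [20, 21], [22], [23, 24],
   PySem.List.pyRange 75 79 1, [79, 80], PySem.List.pyRange 89 97 1, [97, 98],
   PySem.List.pyRange 143 146 1,
   [146, 155], [149, 151, 153], [150, 152, 154], PySem.List.pyRange 168 174 1,
   PySem.List.pyRange 177 183 1, [195, 198], [196], [197, 199],
   [207, 208, 212, 213], [209, 210], [211, 214]]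

-- _PAIRS = sorted(((k, g) for g in GROUPS for k in g), key=lambda p: p[0])
def pvPairs : List (Int × List Int) :=
  PySem.List.sorted (pvGroups.flatMap (fun g => g.map (fun k => (k, g))))
    (fun p => p.1) false

-- the while loop; fuel = hi - lo bounds the iterations (each step shrinks hi - lo),
-- so the recursion is structural and kernel-reducible; pairs[mid] is in range
-- since lo ≤ mid < hi ≤ len, so getD is exact for Python's pairs[mid]
def pvBisect (pairs : List (Int × List Int)) (number : Int) :
    Nat → Nat → Nat → Nat
  | 0, lo, _ => lo
  | fuel + 1, lo, hi =>
    if lo < hi then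
      let mid := (lo + hi) / 2
      if (pairs.getD mid (0, [])).1 < number then
        pvBisect pairs number fuel (mid + 1) hi
      else
        pvBisect pairs number fuel lo mid
    else lo

def getGroupNumbersFromNumber_alt (number : Int) : List Int :=
  let lo := pvBisect pvPairs number pvPairs.length 0 pvPairs.length
  if lo < pvPairs.length ∧ (pvPairs.getD lo (0, [])).1 = number then
    (pvPairs.getD lo (0, [])).2
  else []

-- ===== PRECONDITION & SPEC =====
def Spec_getGroupNumbersFromNumber (number : Int) (out : List Int) : Prop := out = getGroupNumbersFromNumber_alt number
instance (number : Int) (out : List Int) : Decidable (Spec_getGroupNumbersFromNumber number out) := by unfold Spec_getGroupNumbersFromNumber; infer_instance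

-- ===== CLAIM (what is proved, stated in full; the proofs are below) =====
def Claim_equal_getGroupNumbersFromNumber : Prop := ∀ (number : Int), Dom_getGroupNumbersFromNumber number → Spec_getGroupNumbersFromNumber number (getGroupNumbersFromNumber number)

-- ===== LEMMAS AND PROOFS =====

-- all 65 space-group numbers occurring in the table
def pvAllKeys : List Int :=
  [1, 3, 4, 5, 16, 17, 18, 19, 20, 21, 22, 23, 24, 75, 76, 77, 78, 79, 80,
   89, 90, 91, 92, 93, 94, 95, 96, 97, 98, 143, 144, 145, 146, 155, 149, 151,
   153, 150, 152, 154, 168, 169, 170, 171, 172, 173, 177, 178, 179, 180, 181,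
   182, 195, 198, 196, 197, 199, 207, 208, 212, 213, 209, 210, 211, 214]

theorem pv_inner_get?_not_mem (g v : List Int) (d : PySem.Dict Int (List Int)) (n : Int)
    (h : n ∉ g) :
    (g.foldl (fun d j => d.insert j v) d).get? n = d.get? n := by
  induction g generalizing d with
  | nil => rfl
  | cons a t ih =>
    simp only [List.foldl_cons]
    rw [ih _ (fun hm => h (List.mem_cons_of_mem a hm)),
        PySem.Dict.get?_insert_of_ne _ _ (by rintro rfl; exact h List.mem_cons_self)]

theorem pv_build_get?_not_mem (gs : List (List Int)) (d : PySem.Dict Int (List Int)) (n : Int)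
    (h : ∀ g ∈ gs, n ∉ g) :
    (gs.foldl (fun d item => item.foldl (fun d j => d.insert j item) d) d).get? n = d.get? n := by
  induction gs generalizing d with
  | nil => rfl
  | cons g t ih =>
    simp only [List.foldl_cons]
    rw [ih _ (fun g' hm => h g' (List.mem_cons_of_mem g hm)),
        pv_inner_get?_not_mem _ _ _ _ (h g List.mem_cons_self)]

theorem pv_not_mem_groups (n : Int) (h : n ∉ pvAllKeys) : ∀ g ∈ pvGroupingA, n ∉ g := by
  intro g hg
  simp only [pvAllKeys, List.mem_cons, List.not_mem_nil, or_false, not_or] at h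
  fin_cases hg <;> simp [PySem.List.pyRange] <;> omega

-- every first component of pvPairs is one of the 65 table keys
set_option maxRecDepth 8192 in
theorem pv_pairs_keys : ∀ p ∈ pvPairs, p.1 ∈ pvAllKeys := by decide

set_option maxRecDepth 8192 in
theorem pv_agree_on_keys : ∀ n ∈ pvAllKeys,
    getGroupNumbersFromNumber n = getGroupNumbersFromNumber_alt n := by
  decide

-- ===== VERDICT (by name: the statement is the Claim_ definition above) =====
theorem getGroupNumbersFromNumber_spec : Claim_equal_getGroupNumbersFromNumber := by
  intro number _
  unfold Spec_getGroupNumbersFromNumber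
  by_cases h : number ∈ pvAllKeys
  · exact pv_agree_on_keys number h
  · -- A returns []
    have hg := pv_not_mem_groups number h
    have hnone : pvMyDict.get? number = none := by
      unfold pvMyDict
      rw [pv_build_get?_not_mem _ _ _ hg]; rfl
    have hA : getGroupNumbersFromNumber number = [] := by
      unfold getGroupNumbersFromNumber
      rw [PySem.Dict.contains_eq_isSome_get?, hnone]
      rfl
    -- B returns []: whatever index the bisection lands on, the key there is a
    -- table key (or the out-of-range default), never `number`
    have hB : getGroupNumbersFromNumber_alt number = [] := by
      unfold getGroupNumbersFromNumber_alt
      set lo := pvBisect pvPairs number pvPairs.length 0 pvPairs.length with hlo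
      rw [if_neg]
      rintro ⟨hlt, heq⟩
      have hmem : pvPairs.getD lo (0, []) ∈ pvPairs := by
        rw [List.getD_eq_getElem?_getD, List.getElem?_eq_getElem hlt]
        exact List.getElem_mem hlt
      exact h (heq ▸ pv_pairs_keys _ hmem)
    rw [hA, hB]
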